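-- pv_equiv track=rewrite | github.com/Chaztikov/sheardata | src/sheardata.py | count_studies
-- ===== SOURCE A (Python) =====
-- def sanitize_identifier( identifier ):
--     return identifier.replace("-","")
--
-- def truncate_to_study( identifier ):
--     sanitized_identifier = sanitize_identifier( identifier )
--     return sanitized_identifier[0:8]
--
-- def count_studies( identifiers ):
--     studies = {}
--     for identifier in identifiers:
--         study = truncate_to_study( identifier )
--         if ( study not in studies ):
--             studies[study] = 1
--         else:
--             studies[study] += 1
--     return studies
-- ===== SOURCE B (Python) =====
-- def sanitize_identifier(identifier):
--     return identifier.replace("-", "")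
--
--
-- def truncate_to_study(identifier):
--     sanitized_identifier = sanitize_identifier(identifier)
--     return sanitized_identifier[0:8]
--
--
-- def count_studies(identifiers):
--     studies_list = [truncate_to_study(identifier) for identifier in identifiers]
--     return {study: studies_list.count(study) for study in dict.fromkeys(studies_list)}
-- ===== Notes on version B (the rewrite author's own statement) =====
-- stated objective: simpler
-- what changed: Replaces the single-pass dict with incremental counter updates by a two-phase scheme: map identifiers to study prefixes once, take the first-occurrence-ordered distinct prefixes (dict.fromkeys), and build the result dict by counting each distinct prefix in the mapped list.
import Mathlib
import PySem

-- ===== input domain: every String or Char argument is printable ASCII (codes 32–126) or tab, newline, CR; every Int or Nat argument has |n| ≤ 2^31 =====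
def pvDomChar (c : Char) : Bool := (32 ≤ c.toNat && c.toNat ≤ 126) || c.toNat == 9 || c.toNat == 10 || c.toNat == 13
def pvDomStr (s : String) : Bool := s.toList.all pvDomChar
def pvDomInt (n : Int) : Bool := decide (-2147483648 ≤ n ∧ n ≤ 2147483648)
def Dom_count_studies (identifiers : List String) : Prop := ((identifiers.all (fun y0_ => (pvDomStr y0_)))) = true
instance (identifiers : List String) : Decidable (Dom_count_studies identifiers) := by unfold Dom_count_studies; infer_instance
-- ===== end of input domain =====

-- B replaces A's incremental counting dict by map-to-prefixes + first-occurrence dedup + per-key count: a simpler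
-- two-phase decomposition with the same result (not faster; O(n*d) vs A's O(n)).
-- ===== PORT A =====
def sanitize_identifier (identifier : String) : String :=
  PySem.Str.replace identifier "-" ""

def truncate_to_study (identifier : String) : String :=
  let sanitized_identifier := sanitize_identifier identifier
  PySem.Str.slice sanitized_identifier (some 0) (some 8)

def count_studies (identifiers : List String) : List (String × Int) :=
  (identifiers.foldl (fun studies identifier =>
      let study := truncate_to_study identifier
      if !(studies.contains study) then
        studies.insert study 1
      else
        studies.insert study (studies.getD study 0 + 1))
    PySem.Dict.empty).items

-- ===== PORT B =====
-- B maps to prefixes once, dedups (dict.fromkeys), and counts each distinct prefix; same dict, simpler decomposition.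
def count_studies_alt (identifiers : List String) : List (String × Int) :=
  let studies_list := identifiers.map truncate_to_study
  -- dict comprehension over the distinct keys of dict.fromkeys: its items are exactly this map, in key order
  (PySem.List.dedup studies_list).map
    (fun study => (study, (PySem.List.count studies_list study : Int)))

-- ===== PRECONDITION & SPEC =====
def Spec_count_studies (identifiers : List String) (out : List (String × Int)) : Prop := out = count_studies_alt identifiers
instance (identifiers : List String) (out : List (String × Int)) : Decidable (Spec_count_studies identifiers out) := by unfold Spec_count_studies; infer_instance

-- ===== CLAIM (what is proved, stated in full; the proofs are below) =====
def Claim_equal_count_studies : Prop := ∀ (identifiers : List String), Dom_count_studies identifiers → Spec_count_studies identifiers (count_studies identifiers)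

-- ===== LEMMAS AND PROOFS =====

-- A's branch pair is exactly the counter update 'insert study (getD study 0 + 1)'.
theorem count_studies_step_eq (d : PySem.Dict String Int) (s : String) :
    (if !(d.contains s) then d.insert s 1 else d.insert s (d.getD s 0 + 1))
      = d.insert s (d.getD s 0 + 1) := by
  by_cases h : d.contains s
  · simp [h]
  · simp [h, PySem.Dict.getD_of_not_contains]

-- ===== VERDICT (by name: the statement is the Claim_ definition above) =====
theorem count_studies_spec : Claim_equal_count_studies := by
  intro identifiers _
  unfold Spec_count_studies count_studies count_studies_alt
  show (identifiers.foldl (fun studies identifier =>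
        if !(studies.contains (truncate_to_study identifier)) then
          studies.insert (truncate_to_study identifier) 1
        else
          studies.insert (truncate_to_study identifier)
            (studies.getD (truncate_to_study identifier) 0 + 1))
      PySem.Dict.empty).items
    = (PySem.List.dedup (identifiers.map truncate_to_study)).map
        (fun study => (study, (PySem.List.count (identifiers.map truncate_to_study) study : Int)))
  rw [← List.foldl_map (f := truncate_to_study)
        (g := fun (studies : PySem.Dict String Int) s =>
          if !(studies.contains s) then studies.insert s 1
          else studies.insert s (studies.getD s 0 + 1)),
      PySem.List.foldl_congr_mem (l := identifiers.map truncate_to_study)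
        (init := (PySem.Dict.empty : PySem.Dict String Int))
        (f := fun studies s =>
          if !(studies.contains s) then studies.insert s 1
          else studies.insert s (studies.getD s 0 + 1))
        (g := fun d s => d.insert s (d.getD s 0 + 1))
        (fun acc x _ => count_studies_step_eq acc x),
      PySem.Dict.foldl_insert_getD_add_one_eq_counter, PySem.Dict.items_counter]
  simp [PySem.List.dedup, PySem.List.count]
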